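-- pv_equiv track=rewrite | github.com/SKywa1kerr/BioAgent | backend/core/report.py | _render_alignment_html
-- ===== SOURCE A (Python) =====
-- def _render_alignment_html(ref_gapped: str, qry_gapped: str, width: int = 80) -> str:
--     """Render gapped alignment as HTML with mismatch highlighting.
--
--     Returns HTML string with <pre> blocks, no Streamlit dependency.
--     Mismatches are highlighted with colored <span> tags.
--     """
--     if not ref_gapped or not qry_gapped:
--         return "<pre>No alignment data</pre>"
--
--     lines: list[str] = []
--     length = min(len(ref_gapped), len(qry_gapped))
--
--     for start in range(0, length, width):
--         end = min(start + width, length)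
--         ref_chunk = ref_gapped[start:end]
--         qry_chunk = qry_gapped[start:end]
--
--         # Build match line and highlighted sequences
--         ref_html_parts: list[str] = []
--         qry_html_parts: list[str] = []
--         match_parts: list[str] = []
--
--         for r, q in zip(ref_chunk, qry_chunk):
--             if r == q:
--                 ref_html_parts.append(r)
--                 qry_html_parts.append(q)
--                 match_parts.append("|")
--             elif r == "-" or q == "-":
--                 ref_html_parts.append(f'<span style="color:#d97706;font-weight:bold">{r}</span>')
--                 qry_html_parts.append(f'<span style="color:#d97706;font-weight:bold">{q}</span>')
--                 match_parts.append(" ")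
--             else:
--                 ref_html_parts.append(f'<span style="color:#dc2626;font-weight:bold">{r}</span>')
--                 qry_html_parts.append(f'<span style="color:#dc2626;font-weight:bold">{q}</span>')
--                 match_parts.append("X")
--
--         pos_label = f"{start + 1:>6}"
--         lines.append(f"Ref {pos_label}  {''.join(ref_html_parts)}")
--         lines.append(f"         {''.join(match_parts)}")
--         lines.append(f"Qry {pos_label}  {''.join(qry_html_parts)}")
--         lines.append("")
--
--     return "<pre style=\"font-family:monospace;font-size:11px;line-height:1.4;white-space:pre-wrap\">" + "\n".join(lines) + "</pre>"
-- ===== SOURCE B (Python) =====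
-- def _span(color, c):
--     return f'<span style="color:{color};font-weight:bold">{c}</span>'
--
--
-- def _render_alignment_html(ref_gapped: str, qry_gapped: str, width: int = 80) -> str:
--     """Stream the aligned pairs once, flushing a block whenever the buffer is full.
--
--     No range/slicing: a single pass keeps three growing line buffers and emits a
--     complete three-line block each time `width` columns have accumulated.
--     """
--     if not ref_gapped or not qry_gapped:
--         return "<pre>No alignment data</pre>"
--
--     blocks: list[str] = []
--     ref_buf = mid_buf = qry_buf = ""
--     start = 0
--     for r, q in zip(ref_gapped, qry_gapped):
--         if len(mid_buf) == width:
--             blocks.append(f"Ref {start + 1:>6}  {ref_buf}\n         {mid_buf}\nQry {start + 1:>6}  {qry_buf}")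
--             start += width
--             ref_buf = mid_buf = qry_buf = ""
--         if r == q:
--             ref_buf += r
--             mid_buf += "|"
--             qry_buf += q
--         elif r == "-" or q == "-":
--             ref_buf += _span("#d97706", r)
--             mid_buf += " "
--             qry_buf += _span("#d97706", q)
--         else:
--             ref_buf += _span("#dc2626", r)
--             mid_buf += "X"
--             qry_buf += _span("#dc2626", q)
--     blocks.append(f"Ref {start + 1:>6}  {ref_buf}\n         {mid_buf}\nQry {start + 1:>6}  {qry_buf}")
--
--     return ("<pre style=\"font-family:monospace;font-size:11px;line-height:1.4;white-space:pre-wrap\">"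
--             + "\n\n".join(blocks) + "\n</pre>")
-- ===== Notes on version B (the rewrite author's own statement) =====
-- stated objective: alternative
-- what changed: B replaces A's two-level chunked layout (outer range(0,length,width) loop slicing the strings and an inner per-chunk classification loop building three part-lists) by a single streaming pass over the zipped character pairs that grows three line buffers and flushes a complete three-line block whenever width columns have accumulated, finally joining whole blocks with blank lines; no range, no slicing, no per-chunk lists.
import Mathlib
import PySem

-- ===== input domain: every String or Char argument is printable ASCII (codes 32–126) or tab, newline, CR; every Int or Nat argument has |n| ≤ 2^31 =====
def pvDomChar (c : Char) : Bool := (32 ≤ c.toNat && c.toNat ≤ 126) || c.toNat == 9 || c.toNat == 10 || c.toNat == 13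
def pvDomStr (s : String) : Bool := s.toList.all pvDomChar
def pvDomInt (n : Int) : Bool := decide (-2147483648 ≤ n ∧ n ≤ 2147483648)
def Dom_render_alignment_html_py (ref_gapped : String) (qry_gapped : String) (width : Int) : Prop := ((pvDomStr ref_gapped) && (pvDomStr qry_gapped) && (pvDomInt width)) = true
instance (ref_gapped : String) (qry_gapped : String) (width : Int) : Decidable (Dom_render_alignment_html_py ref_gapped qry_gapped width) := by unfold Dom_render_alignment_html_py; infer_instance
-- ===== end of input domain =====

-- B streams the zipped pairs once, growing three line buffers and flushing a finished
-- block whenever `width` columns have accumulated, instead of A's outer range/slice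
-- chunk loop with an inner per-chunk classification loop; objective: alternative
-- decomposition, identical output.

-- Shared literal fragments
def pvOrange (c : Char) : List Char :=
  "<span style=\"color:#d97706;font-weight:bold\">".toList ++ [c] ++ "</span>".toList

def pvRed (c : Char) : List Char :=
  "<span style=\"color:#dc2626;font-weight:bold\">".toList ++ [c] ++ "</span>".toList

-- f"{n:>6}": str(n) right-justified with spaces to width 6 (hand port, exact for any Int)
def pvPosLabel (n : Int) : List Char :=
  List.replicate (6 - (PySem.Int.toChars n).length) ' ' ++ PySem.Int.toChars n

def pvHeader : List Char :=
  "<pre style=\"font-family:monospace;font-size:11px;line-height:1.4;white-space:pre-wrap\">".toList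

-- ===== PORT A =====
def render_alignment_html_py (ref_gapped : String) (qry_gapped : String) (width : Int) : String :=
  if ref_gapped = "" ∨ qry_gapped = "" then "<pre>No alignment data</pre>"
  else
    let R := ref_gapped.toList
    let Q := qry_gapped.toList
    let length : Int := min (R.length : Int) (Q.length : Int)
    let lines : List (List Char) :=
      (PySem.List.pyRange 0 length width).foldl (fun lines start =>
        let end_ : Int := min (start + width) length
        let ref_chunk := PySem.List.slice R (some start) (some end_)
        let qry_chunk := PySem.List.slice Q (some start) (some end_)
        let parts := (ref_chunk.zip qry_chunk).foldl
          (fun (acc : List (List Char) × List (List Char) × List (List Char)) rq =>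
            if rq.1 = rq.2 then
              (acc.1 ++ [[rq.1]], acc.2.1 ++ [[rq.2]], acc.2.2 ++ [['|']])
            else if rq.1 = '-' ∨ rq.2 = '-' then
              (acc.1 ++ [pvOrange rq.1], acc.2.1 ++ [pvOrange rq.2], acc.2.2 ++ [[' ']])
            else
              (acc.1 ++ [pvRed rq.1], acc.2.1 ++ [pvRed rq.2], acc.2.2 ++ [['X']]))
          ([], [], [])
        let pos_label := pvPosLabel (start + 1)
        lines ++ ["Ref ".toList ++ pos_label ++ "  ".toList ++ PySem.Chars.join [] parts.1,
                  "         ".toList ++ PySem.Chars.join [] parts.2.2,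
                  "Qry ".toList ++ pos_label ++ "  ".toList ++ PySem.Chars.join [] parts.2.1,
                  []])
        []
    String.ofList (pvHeader ++ PySem.Chars.join ['\n'] lines ++ "</pre>".toList)

-- ===== PORT B =====
def pvSpan (color : String) (c : Char) : List Char :=
  "<span style=\"color:".toList ++ color.toList ++ ";font-weight:bold\">".toList ++ [c] ++ "</span>".toList

-- the f-string block Source B appends (used at the flush point and once after the loop)
def pvBlockB (s : Int) (rb mb qb : List Char) : List Char :=
  "Ref ".toList ++ pvPosLabel (s+1) ++ "  ".toList ++ rb ++
    '\n' :: ("         ".toList ++ mb) ++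
    '\n' :: ("Qry ".toList ++ pvPosLabel (s+1) ++ "  ".toList ++ qb)

-- one loop iteration of Source B: flush a full block, then classify and append the pair
def pvStepB (width : Int) (st : List (List Char) × List Char × List Char × List Char × Int)
    (rq : Char × Char) : List (List Char) × List Char × List Char × List Char × Int :=
  let st := if (st.2.2.1.length : Int) = width
    then (st.1 ++ [pvBlockB st.2.2.2.2 st.2.1 st.2.2.1 st.2.2.2.1],
          ([] : List Char), ([] : List Char), ([] : List Char), st.2.2.2.2 + width)
    else st
  if rq.1 = rq.2 then
    (st.1, st.2.1 ++ [rq.1], st.2.2.1 ++ ['|'], st.2.2.2.1 ++ [rq.2], st.2.2.2.2)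
  else if rq.1 = '-' ∨ rq.2 = '-' then
    (st.1, st.2.1 ++ pvSpan "#d97706" rq.1, st.2.2.1 ++ [' '],
     st.2.2.2.1 ++ pvSpan "#d97706" rq.2, st.2.2.2.2)
  else
    (st.1, st.2.1 ++ pvSpan "#dc2626" rq.1, st.2.2.1 ++ ['X'],
     st.2.2.2.1 ++ pvSpan "#dc2626" rq.2, st.2.2.2.2)

def render_alignment_html_py_alt (ref_gapped : String) (qry_gapped : String) (width : Int) : String :=
  if ref_gapped = "" ∨ qry_gapped = "" then "<pre>No alignment data</pre>"
  else
    -- state: (blocks, ref_buf, mid_buf, qry_buf, start)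
    let fin := (ref_gapped.toList.zip qry_gapped.toList).foldl (pvStepB width)
      (([] : List (List Char)), ([] : List Char), ([] : List Char), ([] : List Char), (0 : Int))
    let blocks := fin.1 ++ [pvBlockB fin.2.2.2.2 fin.2.1 fin.2.2.1 fin.2.2.2.1]
    String.ofList (pvHeader ++ PySem.Chars.join ['\n', '\n'] blocks ++ '\n' :: "</pre>".toList)

-- ===== PRECONDITION & SPEC =====
-- Pre_ excludes only width ≤ 0 with both strings nonempty: width = 0 makes A raise
-- ValueError (range step 0); width < 0 is a degenerate corner where A's empty <pre>
-- block is an accident of range's empty negative-step list and B's single full block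
-- is an equally defensible rendering — no caller passes a non-positive width.
def Pre_render_alignment_html_py (ref_gapped : String) (qry_gapped : String) (width : Int) : Prop :=
  ref_gapped = "" ∨ qry_gapped = "" ∨ 1 ≤ width
instance (ref_gapped : String) (qry_gapped : String) (width : Int) : Decidable (Pre_render_alignment_html_py ref_gapped qry_gapped width) := by unfold Pre_render_alignment_html_py; infer_instance

def pvWitness_render_alignment_html_py : String × String × Int := ("ACG-T", "AC-GT", 2)

def Spec_render_alignment_html_py (ref_gapped : String) (qry_gapped : String) (width : Int) (out : String) : Prop := out = render_alignment_html_py_alt ref_gapped qry_gapped width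
instance (ref_gapped : String) (qry_gapped : String) (width : Int) (out : String) : Decidable (Spec_render_alignment_html_py ref_gapped qry_gapped width out) := by unfold Spec_render_alignment_html_py; infer_instance

-- ===== CLAIM (what is proved, stated in full; the proofs are below) =====
def Claim_equal_render_alignment_html_py : Prop := ∀ (ref_gapped : String) (qry_gapped : String) (width : Int), Dom_render_alignment_html_py ref_gapped qry_gapped width → Pre_render_alignment_html_py ref_gapped qry_gapped width → Spec_render_alignment_html_py ref_gapped qry_gapped width (render_alignment_html_py ref_gapped qry_gapped width)

-- ===== LEMMAS AND PROOFS =====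

-- classification cell of one aligned pair: (ref-html, qry-html, match mark)
def pvCell (rq : Char × Char) : List Char × List Char × List Char :=
  if rq.1 = rq.2 then ([rq.1], [rq.2], ['|'])
  else if rq.1 = '-' ∨ rq.2 = '-' then (pvOrange rq.1, pvOrange rq.2, [' '])
  else (pvRed rq.1, pvRed rq.2, ['X'])

def pvBufR (p : List (Char × Char)) : List Char := (p.map (fun rq => (pvCell rq).1)).flatten
def pvBufQ (p : List (Char × Char)) : List Char := (p.map (fun rq => (pvCell rq).2.1)).flatten
def pvBufM (p : List (Char × Char)) : List Char := (p.map (fun rq => (pvCell rq).2.2)).flatten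

-- the chunk decomposition both programs realise: slices of w+1 pairs with start labels
def pvChunks (w : Nat) (z : List (Char × Char)) (s : Int) : List (Int × List (Char × Char)) :=
  if z.length ≤ w + 1 then [(s, z)]
  else (s, z.take (w + 1)) :: pvChunks w (z.drop (w + 1)) (s + ((w : Int) + 1))
termination_by z.length
decreasing_by simp; omega

-- the four lines A appends for one chunk
def pvFour (s : Int) (c : List (Char × Char)) : List (List Char) :=
  ["Ref ".toList ++ pvPosLabel (s + 1) ++ "  ".toList ++ pvBufR c,
   "         ".toList ++ pvBufM c,
   "Qry ".toList ++ pvPosLabel (s + 1) ++ "  ".toList ++ pvBufQ c,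
   []]

-- the block string B appends for one chunk
def pvBlockOf (sc : Int × List (Char × Char)) : List Char :=
  pvBlockB sc.1 (pvBufR sc.2) (pvBufM sc.2) (pvBufQ sc.2)

theorem pv_span_orange (c : Char) : pvSpan "#d97706" c = pvOrange c := rfl
theorem pv_span_red (c : Char) : pvSpan "#dc2626" c = pvRed c := rfl

theorem pv_bufM_len (p : List (Char × Char)) : (pvBufM p).length = p.length := by
  induction p with
  | nil => simp [pvBufM]
  | cons rq p ih =>
    simp only [pvBufM, List.map_cons, List.flatten_cons, List.length_append, List.length_cons] at ih ⊢
    have : ((pvCell rq).2.2).length = 1 := by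
      unfold pvCell; split_ifs <;> rfl
    omega

theorem pv_buf_append (p : List (Char × Char)) (rq : Char × Char) :
    pvBufR (p ++ [rq]) = pvBufR p ++ (pvCell rq).1 ∧
    pvBufM (p ++ [rq]) = pvBufM p ++ (pvCell rq).2.2 ∧
    pvBufQ (p ++ [rq]) = pvBufQ p ++ (pvCell rq).2.1 := by
  refine ⟨?_, ?_, ?_⟩ <;> simp [pvBufR, pvBufM, pvBufQ]

theorem pv_join_nil : ∀ ps : List (List Char), PySem.Chars.join [] ps = ps.flatten
  | [] => by simp [PySem.Chars.join, List.intercalate]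
  | [x] => by simp [PySem.Chars.join, List.intercalate]
  | x :: y :: t => by
    have ih := pv_join_nil (y :: t)
    simp only [PySem.Chars.join, List.intercalate] at ih ⊢
    simp_all [List.intersperse]

theorem pv_join_cons (sep x : List Char) (y : List Char) (t : List (List Char)) :
    PySem.Chars.join sep (x :: y :: t) = x ++ sep ++ PySem.Chars.join sep (y :: t) := by
  simp [PySem.Chars.join, List.intercalate]

-- zip commutes with take / drop (general facts; not found in Mathlib by search)
theorem pv_zip_take {α β : Type} (l : List α) (l' : List β) (n : Nat) :
    (l.take n).zip (l'.take n) = (l.zip l').take n := by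
  induction l generalizing l' n with
  | nil => simp
  | cons a l ih =>
    cases l' with
    | nil => simp
    | cons b l' => cases n with
      | zero => simp
      | succ n => simp [ih]

theorem pv_zip_drop {α β : Type} (l : List α) (l' : List β) (n : Nat) :
    (l.drop n).zip (l'.drop n) = (l.zip l').drop n := by
  induction n generalizing l l' with
  | zero => simp
  | succ n ih =>
    cases l with
    | nil => simp
    | cons a l => cases l' with
      | nil => simp
      | cons b l' => simpa using ih l l'

-- A's inner three-accumulator loop is the three projections of pvCell, mapped
theorem pv_foldTriple (z : List (Char × Char)) (a b c : List (List Char)) :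
    z.foldl
      (fun (acc : List (List Char) × List (List Char) × List (List Char)) rq =>
        if rq.1 = rq.2 then
          (acc.1 ++ [[rq.1]], acc.2.1 ++ [[rq.2]], acc.2.2 ++ [['|']])
        else if rq.1 = '-' ∨ rq.2 = '-' then
          (acc.1 ++ [pvOrange rq.1], acc.2.1 ++ [pvOrange rq.2], acc.2.2 ++ [[' ']])
        else
          (acc.1 ++ [pvRed rq.1], acc.2.1 ++ [pvRed rq.2], acc.2.2 ++ [['X']]))
      (a, b, c)
    = (a ++ z.map (fun rq => (pvCell rq).1),
       b ++ z.map (fun rq => (pvCell rq).2.1),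
       c ++ z.map (fun rq => (pvCell rq).2.2)) := by
  induction z generalizing a b c with
  | nil => simp
  | cons rq z ih =>
    simp only [List.foldl_cons, List.map_cons]
    by_cases h1 : rq.1 = rq.2
    · simp [h1, ih, pvCell]
    · by_cases h2 : rq.1 = '-' ∨ rq.2 = '-'
      · simp [h1, h2, ih, pvCell]
      · simp [h1, h2, ih, pvCell]

-- pyRange with a positive step: cons and nil unfoldings
theorem pv_pyRange_nil {a b w : Int} (hw : 0 < w) (h : b ≤ a) :
    PySem.List.pyRange a b w = [] := by
  rw [PySem.List.pyRange_of_pos _ _ hw, if_neg (by omega)]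
  simp

theorem pv_pyRange_cons {s L w : Int} (hw : 0 < w) (h : s < L) :
    PySem.List.pyRange s L w = s :: PySem.List.pyRange (s + w) L w := by
  rw [PySem.List.pyRange_of_pos _ _ hw, PySem.List.pyRange_of_pos _ _ hw]
  have ha : 0 ≤ L - s - 1 := by omega
  have hq0 : 0 ≤ (L - s - 1) / w := Int.ediv_nonneg ha (le_of_lt hw)
  have hn : (L - s + w - 1) / w = (L - s - 1) / w + 1 := by
    have h1 : L - s + w - 1 = (L - s - 1) + 1 * w := by ring
    rw [h1, Int.add_mul_ediv_right _ _ (by omega : w ≠ 0)]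
  rw [if_pos h]
  by_cases h2 : s + w < L
  · rw [if_pos h2]
    have h3 : L - (s + w) + w - 1 = L - s - 1 := by ring
    rw [h3, hn]
    rw [show ((L - s - 1) / w + 1).toNat = ((L - s - 1) / w).toNat + 1 by omega]
    rw [List.range_succ_eq_map]
    simp only [List.map_cons, List.map_map, Nat.cast_zero, mul_zero, add_zero]
    congr 1
    apply List.map_congr_left
    intro k _
    simp only [Function.comp_apply]
    push_cast
    ring
  · rw [if_neg h2]
    have h4 : (L - s - 1) / w = 0 := by
      apply Int.ediv_eq_zero_of_lt ha; omega
    rw [hn, h4]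
    simp

theorem pv_chunks_ne_nil (w : Nat) (z : List (Char × Char)) (s : Int) :
    pvChunks w z s ≠ [] := by
  unfold pvChunks; split <;> simp

-- A's chunk loop equals the flatMap of pvFour over the chunk decomposition
theorem pv_A_fold (w : Nat) (z : List (Char × Char)) :
    ∀ (n s0 : Nat) (lines0 : List (List Char)), z.length - s0 ≤ n → s0 < z.length →
    (PySem.List.pyRange (s0 : Int) (z.length : Int) ((w : Int) + 1)).foldl
      (fun lines s => lines ++ pvFour s (PySem.List.slice z (some s) (some (s + ((w : Int) + 1)))))
      lines0
    = lines0 ++ (pvChunks w (z.drop s0) (s0 : Int)).flatMap (fun sc => pvFour sc.1 sc.2) := by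
  intro n
  induction n with
  | zero => intro s0 lines0 hn hlt; omega
  | succ n ih =>
    intro s0 lines0 hn hlt
    have hw : (0 : Int) < (w : Int) + 1 := by positivity
    rw [pv_pyRange_cons hw (by exact_mod_cast hlt)]
    rw [List.foldl_cons]
    have hslice : PySem.List.slice z (some (s0 : Int)) (some ((s0 : Int) + ((w : Int) + 1)))
        = (z.drop s0).take (w + 1) := by
      rw [show (s0 : Int) + ((w : Int) + 1) = (s0 : Int) + ((w + 1 : Nat) : Int) by push_cast; ring]
      exact PySem.List.slice_natCast_add z s0 (w + 1)
    by_cases h2 : z.length ≤ s0 + (w + 1)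
    · have hnil : PySem.List.pyRange ((s0 : Int) + ((w : Int) + 1)) (z.length : Int) ((w : Int) + 1) = [] := by
        apply pv_pyRange_nil hw
        omega
      rw [hnil]
      simp only [List.foldl_nil]
      have hchunk : pvChunks w (z.drop s0) (s0 : Int) = [((s0 : Int), z.drop s0)] := by
        unfold pvChunks
        rw [if_pos (by simp; omega)]
      rw [hchunk, hslice]
      have : (z.drop s0).take (w + 1) = z.drop s0 := by
        apply List.take_of_length_le; simp; omega
      simp [this]
    · rw [not_le] at h2
      have hrec := ih (s0 + (w + 1)) (lines0 ++ pvFour (s0 : Int) ((z.drop s0).take (w + 1)))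
        (by omega) (by omega)
      rw [show (s0 : Int) + ((w : Int) + 1) = ((s0 + (w + 1) : Nat) : Int) by push_cast; ring] at *
      rw [hslice, hrec]
      have hchunk : pvChunks w (z.drop s0) (s0 : Int)
          = ((s0 : Int), (z.drop s0).take (w + 1))
            :: pvChunks w ((z.drop s0).drop (w + 1)) ((s0 : Int) + ((w : Int) + 1)) := by
        rw [pvChunks]
        rw [if_neg (by simp; omega)]
      rw [hchunk]
      have hdd : (z.drop s0).drop (w + 1) = z.drop (s0 + (w + 1)) := by
        rw [List.drop_drop]
      rw [hdd]
      rw [show (s0 : Int) + ((w : Int) + 1) = ((s0 + (w + 1) : Nat) : Int) by push_cast; ring]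
      simp [List.append_assoc]

-- one application of B's step function on a well-formed buffer state
theorem pv_step_eval (w : Nat) (blocks : List (List Char)) (p : List (Char × Char)) (s : Int) (rq : Char × Char) :
    pvStepB ((w : Int) + 1) (blocks, pvBufR p, pvBufM p, pvBufQ p, s) rq
    = if p.length = w + 1 then
        (blocks ++ [pvBlockB s (pvBufR p) (pvBufM p) (pvBufQ p)],
         pvBufR [rq], pvBufM [rq], pvBufQ [rq], s + ((w : Int) + 1))
      else
        (blocks, pvBufR (p ++ [rq]), pvBufM (p ++ [rq]), pvBufQ (p ++ [rq]), s) := by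
  have hmlen : (((pvBufM p).length : Int) = ((w : Int) + 1)) ↔ p.length = w + 1 := by
    rw [pv_bufM_len p]
    constructor <;> intro h <;> [exact_mod_cast h; (rw [h]; push_cast; ring)]
  obtain ⟨hr, hm, hq⟩ := pv_buf_append p rq
  by_cases hfull : p.length = w + 1
  · rw [if_pos hfull]
    unfold pvStepB
    simp only [hmlen, if_pos hfull]
    have br : pvBufR [rq] = (pvCell rq).1 := by simp [pvBufR]
    have bm : pvBufM [rq] = (pvCell rq).2.2 := by simp [pvBufM]
    have bq : pvBufQ [rq] = (pvCell rq).2.1 := by simp [pvBufQ]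
    rw [br, bm, bq]
    unfold pvCell
    split_ifs <;> simp [pv_span_orange, pv_span_red]
  · rw [if_neg hfull]
    unfold pvStepB
    simp only [hmlen, if_neg hfull]
    rw [hr, hm, hq]
    unfold pvCell
    split_ifs <;> simp [pv_span_orange, pv_span_red]

-- B's single streaming pass with buffers holding the partial chunk p
theorem pv_B_fold (w : Nat) :
    ∀ (z p : List (Char × Char)) (blocks : List (List Char)) (s : Int),
    1 ≤ p.length → p.length ≤ w + 1 →
    (let fin := z.foldl (pvStepB ((w : Int) + 1)) (blocks, pvBufR p, pvBufM p, pvBufQ p, s)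
     fin.1 ++ [pvBlockB fin.2.2.2.2 fin.2.1 fin.2.2.1 fin.2.2.2.1])
    = blocks ++ (pvChunks w (p ++ z) s).map pvBlockOf := by
  intro z
  induction z with
  | nil =>
    intro p blocks s h1 h2
    simp only [List.foldl_nil]
    have hchunk : pvChunks w (p ++ []) s = [(s, p)] := by
      rw [List.append_nil, pvChunks, if_pos (by omega)]
    rw [hchunk]
    simp [pvBlockOf]
  | cons rq z ih =>
    intro p blocks s h1 h2
    simp only [List.foldl_cons]
    rw [pv_step_eval w blocks p s rq]
    by_cases hfull : p.length = w + 1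
    · rw [if_pos hfull]
      have hrec := ih [rq] (blocks ++ [pvBlockB s (pvBufR p) (pvBufM p) (pvBufQ p)])
        (s + ((w : Int) + 1)) (by simp) (by simp)
      simp only [List.singleton_append] at hrec
      rw [hrec]
      have hchunk : pvChunks w (p ++ rq :: z) s
          = (s, p) :: pvChunks w (rq :: z) (s + ((w : Int) + 1)) := by
        rw [pvChunks, if_neg (by simp; omega)]
        rw [List.take_left' (by omega), List.drop_left' (by omega)]
      rw [hchunk]
      simp [pvBlockOf, List.append_assoc]
    · rw [if_neg hfull]
      have hrec := ih (p ++ [rq]) blocks s (by simp) (by simp; omega)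
      rw [hrec]
      have : (p ++ [rq]) ++ z = p ++ rq :: z := by simp
      rw [this]

-- joining A's four-line groups with '\n' equals joining B's blocks with blank lines
theorem pv_join_four_last (s : Int) (c : List (Char × Char)) :
    PySem.Chars.join ['\n'] (pvFour s c) = pvBlockOf (s, c) ++ ['\n'] := by
  simp [pvFour, pvBlockOf, pvBlockB, PySem.Chars.join, List.intercalate, List.intersperse]

theorem pv_join_four (s : Int) (c : List (Char × Char)) (rest : List (List Char)) (h : rest ≠ []) :
    PySem.Chars.join ['\n'] (pvFour s c ++ rest)
    = pvBlockOf (s, c) ++ '\n' :: '\n' :: PySem.Chars.join ['\n'] rest := by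
  cases rest with
  | nil => exact absurd rfl h
  | cons r rs =>
    simp only [pvFour, List.cons_append, List.nil_append]
    rw [pv_join_cons, pv_join_cons, pv_join_cons, pv_join_cons]
    simp [pvBlockOf, pvBlockB, List.append_assoc]

theorem pv_join_blocks : ∀ (C : List (Int × List (Char × Char))), C ≠ [] →
    PySem.Chars.join ['\n'] (C.flatMap (fun sc => pvFour sc.1 sc.2)) ++ "</pre>".toList
    = PySem.Chars.join ['\n', '\n'] (C.map pvBlockOf) ++ '\n' :: "</pre>".toList
  | [], h => absurd rfl h
  | [x], _ => by
    simp only [List.flatMap_cons, List.flatMap_nil, List.append_nil, List.map_cons, List.map_nil]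
    rw [pv_join_four_last]
    simp [PySem.Chars.join, List.intercalate]
  | x :: y :: t, _ => by
    have ih := pv_join_blocks (y :: t) (by simp)
    simp only [List.flatMap_cons, List.map_cons] at ih ⊢
    rw [pv_join_four x.1 x.2 _ (by simp [pvFour])]
    rw [pv_join_cons ['\n', '\n'] (pvBlockOf x) (pvBlockOf y) (t.map pvBlockOf)]
    simp only [List.append_assoc, List.cons_append, List.nil_append]
    rw [ih]

-- ===== VERDICT (by name: the statement is the Claim_ definition above) =====
theorem render_alignment_html_py_spec : Claim_equal_render_alignment_html_py := by
  intro ref qry width hdom hpre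
  unfold Spec_render_alignment_html_py
  unfold render_alignment_html_py render_alignment_html_py_alt
  by_cases hg : ref = "" ∨ qry = ""
  · simp [hg]
  · rw [if_neg hg, if_neg hg]
    have hw1 : 1 ≤ width := by
      rcases hpre with h | h | h
      · exact absurd (Or.inl h) hg
      · exact absurd (Or.inr h) hg
      · exact h
    set w : Nat := (width - 1).toNat with hwdef
    have hwidth : width = (w : Int) + 1 := by omega
    rw [hwidth]
    have hne := not_or.mp hg
    have hR : 0 < ref.toList.length :=
      List.length_pos_of_ne_nil (fun h => hne.1 (by simpa using h))
    have hQ : 0 < qry.toList.length :=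
      List.length_pos_of_ne_nil (fun h => hne.2 (by simpa using h))
    simp only []
    set R := ref.toList with hRdef
    set Q := qry.toList with hQdef
    set z := R.zip Q with hzdef
    have hzlen : z.length = min R.length Q.length := by simp [hzdef]
    have hzpos : 0 < z.length := by omega
    have hzL : (z.length : Int) = min (R.length : Int) (Q.length : Int) := by
      rw [hzlen]; push_cast; omega
    have hwpos : (0 : Int) < (w : Int) + 1 := by positivity
    -- A side: rewrite the chunk-loop body into pvFour of a slice of z
    have hbody :
        (PySem.List.pyRange 0 (min (R.length : Int) (Q.length : Int)) ((w : Int) + 1)).foldl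
          (fun lines start =>
            lines ++
              ["Ref ".toList ++ pvPosLabel (start + 1) ++ "  ".toList ++
                 PySem.Chars.join []
                   (((PySem.List.slice R (some start) (some (min (start + ((w : Int) + 1)) (min (R.length : Int) (Q.length : Int))))).zip
                      (PySem.List.slice Q (some start) (some (min (start + ((w : Int) + 1)) (min (R.length : Int) (Q.length : Int)))))).foldl
                     (fun (acc : List (List Char) × List (List Char) × List (List Char)) rq =>
                       if rq.1 = rq.2 then
                         (acc.1 ++ [[rq.1]], acc.2.1 ++ [[rq.2]], acc.2.2 ++ [['|']])
                       else if rq.1 = '-' ∨ rq.2 = '-' then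
                         (acc.1 ++ [pvOrange rq.1], acc.2.1 ++ [pvOrange rq.2], acc.2.2 ++ [[' ']])
                       else
                         (acc.1 ++ [pvRed rq.1], acc.2.1 ++ [pvRed rq.2], acc.2.2 ++ [['X']]))
                     ([], [], [])).1,
               "         ".toList ++
                 PySem.Chars.join []
                   (((PySem.List.slice R (some start) (some (min (start + ((w : Int) + 1)) (min (R.length : Int) (Q.length : Int))))).zip
                      (PySem.List.slice Q (some start) (some (min (start + ((w : Int) + 1)) (min (R.length : Int) (Q.length : Int)))))).foldl
                     (fun (acc : List (List Char) × List (List Char) × List (List Char)) rq =>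
                       if rq.1 = rq.2 then
                         (acc.1 ++ [[rq.1]], acc.2.1 ++ [[rq.2]], acc.2.2 ++ [['|']])
                       else if rq.1 = '-' ∨ rq.2 = '-' then
                         (acc.1 ++ [pvOrange rq.1], acc.2.1 ++ [pvOrange rq.2], acc.2.2 ++ [[' ']])
                       else
                         (acc.1 ++ [pvRed rq.1], acc.2.1 ++ [pvRed rq.2], acc.2.2 ++ [['X']]))
                     ([], [], [])).2.2,
               "Qry ".toList ++ pvPosLabel (start + 1) ++ "  ".toList ++
                 PySem.Chars.join []
                   (((PySem.List.slice R (some start) (some (min (start + ((w : Int) + 1)) (min (R.length : Int) (Q.length : Int))))).zip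
                      (PySem.List.slice Q (some start) (some (min (start + ((w : Int) + 1)) (min (R.length : Int) (Q.length : Int)))))).foldl
                     (fun (acc : List (List Char) × List (List Char) × List (List Char)) rq =>
                       if rq.1 = rq.2 then
                         (acc.1 ++ [[rq.1]], acc.2.1 ++ [[rq.2]], acc.2.2 ++ [['|']])
                       else if rq.1 = '-' ∨ rq.2 = '-' then
                         (acc.1 ++ [pvOrange rq.1], acc.2.1 ++ [pvOrange rq.2], acc.2.2 ++ [[' ']])
                       else
                         (acc.1 ++ [pvRed rq.1], acc.2.1 ++ [pvRed rq.2], acc.2.2 ++ [['X']]))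
                     ([], [], [])).2.1,
               []])
          []
        = (PySem.List.pyRange 0 (min (R.length : Int) (Q.length : Int)) ((w : Int) + 1)).foldl
            (fun lines s =>
              lines ++ pvFour s (PySem.List.slice z (some s) (some (s + ((w : Int) + 1)))))
            [] := by
      apply PySem.List.foldl_congr_mem
      intro acc s hs
      obtain ⟨hs0, hsL, -⟩ := (PySem.List.mem_pyRange_iff_of_pos hwpos s).mp hs
      rw [pv_foldTriple]
      simp only [List.nil_append]
      have he0 : (0 : Int) ≤ min (s + ((w : Int) + 1)) (min (R.length : Int) (Q.length : Int)) := by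
        omega
      have hsw0 : (0 : Int) ≤ s + ((w : Int) + 1) := by omega
      have hchunk :
          (PySem.List.slice R (some s) (some (min (s + ((w : Int) + 1)) (min (R.length : Int) (Q.length : Int))))).zip
            (PySem.List.slice Q (some s) (some (min (s + ((w : Int) + 1)) (min (R.length : Int) (Q.length : Int)))))
          = PySem.List.slice z (some s) (some (s + ((w : Int) + 1))) := by
        rw [PySem.List.slice_toNat R hs0 he0, PySem.List.slice_toNat Q hs0 he0,
            PySem.List.slice_toNat z hs0 hsw0]
        rw [pv_zip_take, pv_zip_drop, ← hzdef]
        rw [List.take_eq_take_iff]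
        simp only [List.length_drop]
        omega
      rw [hchunk, pv_join_nil, pv_join_nil, pv_join_nil]
      simp [pvFour, pvBufR, pvBufM, pvBufQ]
    rw [hbody]
    -- A side: the rewritten fold is the chunk decomposition
    have hA := pv_A_fold w z z.length 0 [] (by omega) hzpos
    simp only [Nat.cast_zero, List.drop_zero, List.nil_append] at hA
    rw [← hzL] at hbody ⊢
    rw [hA]
    -- B side: peel the first pair, then apply the streaming invariant
    obtain ⟨c, z0, hz⟩ := List.exists_cons_of_ne_nil (List.ne_nil_of_length_pos hzpos)
    rw [hz, List.foldl_cons]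
    have h0 : (([] : List (List Char)), ([] : List Char), ([] : List Char), ([] : List Char), (0 : Int))
        = (([] : List (List Char)), pvBufR [], pvBufM [], pvBufQ [], (0 : Int)) := rfl
    rw [h0, pv_step_eval w [] [] 0 c, if_neg (by simp : ¬([] : List (Char × Char)).length = w + 1)]
    simp only [List.nil_append]
    have hB := pv_B_fold w z0 [c] [] 0 (by simp) (by simp)
    simp only [List.singleton_append, List.nil_append] at hB
    rw [hB]
    rw [← hz]
    -- join the two layouts
    apply congrArg
    apply congrArg (fun l => pvHeader ++ l)
    exact pv_join_blocks (pvChunks w z 0) (pv_chunks_ne_nil w z 0)
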